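-- pv_equiv track=rewrite | github.com/ashish-chiks-75/Pycharm-Projects | project1/bomberman_game.py | detonation
-- ===== SOURCE A (Python) =====
-- def detonation(r, c, grid):
--     A = []
--     for i in range(r):
--         for j in range(c):
--             if grid[i][j] == "O":
--                 A.append([i, j])
--             grid[i][j] = "O"
--     for a in range(len(A)):
--         x = A[a][0]
--         y = A[a][1]
--         grid[x][y] = "."
--         if x + 1 <= (r - 1):
--             grid[x+1][y] = "."
--         if (x - 1) >= 0:
--             grid[x-1][y] = "."
--         if y + 1 <= (c - 1):
--             grid[x][y+1] = "."
--         if (y - 1) >= 0: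
--             grid[x][y-1] = "."
--     return grid
-- ===== SOURCE B (Python) =====
-- def detonation(r, c, grid):
--     # Local stencil: snapshot the original values, then compute each output cell
--     # independently from its own 4-neighborhood ('.' iff it or an in-bounds
--     # neighbor held a bomb originally, else 'O'); mutates grid in place like A.
--     orig = [[grid[i][j] for j in range(c)] for i in range(r)]
--
--     def bomb(i, j):
--         return 0 <= i < r and 0 <= j < c and orig[i][j] == "O"
--
--     for i in range(r):
--         for j in range(c):
--             hit = (bomb(i, j) or bomb(i + 1, j) or bomb(i - 1, j)
--                    or bomb(i, j + 1) or bomb(i, j - 1))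
--             grid[i][j] = "." if hit else "O"
--     return grid
-- ===== Notes on version B (the rewrite author's own statement) =====
-- stated objective: alternative
-- what changed: A fills the region with 'O' while collecting bomb coordinates and then overwrites '.' per bomb with guarded neighbor writes; B is a local stencil: it snapshots the original grid once and computes every output cell independently from its own 4-neighborhood, with no bomb list and no per-bomb writes.
import Mathlib
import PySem

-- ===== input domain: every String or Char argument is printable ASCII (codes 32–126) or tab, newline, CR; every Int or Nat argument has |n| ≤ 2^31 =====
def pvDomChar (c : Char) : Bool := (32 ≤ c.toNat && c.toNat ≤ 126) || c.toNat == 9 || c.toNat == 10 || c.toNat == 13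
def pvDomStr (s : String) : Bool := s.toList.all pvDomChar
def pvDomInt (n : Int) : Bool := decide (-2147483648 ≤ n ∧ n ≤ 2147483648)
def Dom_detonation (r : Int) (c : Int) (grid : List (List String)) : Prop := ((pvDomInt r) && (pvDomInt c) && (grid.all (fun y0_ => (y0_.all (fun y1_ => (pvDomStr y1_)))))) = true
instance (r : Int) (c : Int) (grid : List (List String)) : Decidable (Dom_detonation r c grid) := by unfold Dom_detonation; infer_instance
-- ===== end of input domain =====

-- B is a local stencil: it snapshots the original grid and computes every output
-- cell independently from its own 4-neighborhood ('.' iff it or an in-bounds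
-- neighbor originally held "O", else "O"), instead of A's fill-with-"O" scan that
-- collects bomb coordinates followed by a per-bomb guarded overwrite loop.
-- Both Pythons mutate `grid` in place identically; the theorems are about the returned value.

-- shared cell read/write helpers (grid[i][j] read and write, Nat indices from range())
def pvCell (g : List (List String)) (i j : Nat) : Option String :=
  (g[i]?).bind (fun row => row[j]?)

def pvSet2 (g : List (List String)) (i j : Nat) (v : String) : List (List String) :=
  g.modify i (fun row => row.set j v)

-- ===== PORT A =====
-- body of A's second loop (the five guarded '.' writes for one bomb)
def pvBlast (r c : Int) (g : List (List String)) (p : Nat × Nat) : List (List String) :=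
  let x := p.1
  let y := p.2
  let g := pvSet2 g x y "."
  let g := if (x : Int) + 1 ≤ r - 1 then pvSet2 g (x + 1) y "." else g
  let g := if (x : Int) - 1 ≥ 0 then pvSet2 g (x - 1) y "." else g
  let g := if (y : Int) + 1 ≤ c - 1 then pvSet2 g x (y + 1) "." else g
  if (y : Int) - 1 ≥ 0 then pvSet2 g x (y - 1) "." else g

def detonation (r : Int) (c : Int) (grid : List (List String)) : List (List String) :=
  let st := (List.range r.toNat).foldl
    (fun (st : List (Nat × Nat) × List (List String)) i =>
      (List.range c.toNat).foldl
        (fun st j =>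
          ((if pvCell st.2 i j = some "O" then st.1 ++ [(i, j)] else st.1),
           pvSet2 st.2 i j "O")) st) ([], grid)
  st.1.foldl (pvBlast r c) st.2

-- ===== PORT B =====
-- the snapshot `orig = [[grid[i][j] for j in range(c)] for i in range(r)]`
-- (inside Pre_ every read is in range, so the .getD "" default is never the value used)
def pvOrig (r c : Int) (grid : List (List String)) : List (List String) :=
  (List.range r.toNat).map (fun i =>
    (List.range c.toNat).map (fun j => (pvCell grid i j).getD ""))

-- `bomb(i, j)`: in-bounds and originally "O" (Int indices: i-1/j-1 may be negative)
def pvBomb (r c : Int) (orig : List (List String)) (i j : Int) : Bool :=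
  decide (0 ≤ i) && decide (i < r) && decide (0 ≤ j) && decide (j < c)
    && (pvCell orig i.toNat j.toNat == some "O")

def detonation_alt (r : Int) (c : Int) (grid : List (List String)) : List (List String) :=
  let orig := pvOrig r c grid
  (List.range r.toNat).foldl
    (fun g i =>
      (List.range c.toNat).foldl
        (fun g j =>
          pvSet2 g i j
            (if pvBomb r c orig i j || pvBomb r c orig ((i : Int) + 1) j
                || pvBomb r c orig ((i : Int) - 1) j || pvBomb r c orig i ((j : Int) + 1)
                || pvBomb r c orig i ((j : Int) - 1)
             then "." else "O")) g)
    grid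

-- ===== PRECONDITION & SPEC =====
-- Pre_ excludes exactly the inputs where A raises IndexError: with a positive column
-- count, the grid must have at least r rows and each of the first r rows at least c cells.
def Pre_detonation (r : Int) (c : Int) (grid : List (List String)) : Prop :=
  c.toNat = 0 ∨ (r.toNat ≤ grid.length ∧ ∀ row ∈ grid.take r.toNat, c.toNat ≤ row.length)
instance (r : Int) (c : Int) (grid : List (List String)) : Decidable (Pre_detonation r c grid) := by
  unfold Pre_detonation; infer_instance

def pvWitness_detonation : Int × Int × List (List String) :=
  (2, 3, [["O", ".", "."], [".", ".", "x"]])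

def Spec_detonation (r : Int) (c : Int) (grid : List (List String)) (out : List (List String)) : Prop := out = detonation_alt r c grid
instance (r : Int) (c : Int) (grid : List (List String)) (out : List (List String)) : Decidable (Spec_detonation r c grid out) := by unfold Spec_detonation; infer_instance

-- ===== CLAIM (what is proved, stated in full; the proofs are below) =====
def Claim_equal_detonation : Prop := ∀ (r : Int) (c : Int) (grid : List (List String)), Dom_detonation r c grid → Pre_detonation r c grid → Spec_detonation r c grid (detonation r c grid)

-- ===== LEMMAS AND PROOFS =====

-- row length viewed through getElem? (0 for a missing row)
def rowLen (g : List (List String)) (i : Nat) : Nat :=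
  ((g[i]?).map List.length).getD 0

-- same length and same row lengths
def SameShape (g g' : List (List String)) : Prop :=
  g.length = g'.length ∧ ∀ k, rowLen g k = rowLen g' k

-- the first R rows exist and have at least C cells
def GoodAt (g : List (List String)) (R C : Nat) : Prop :=
  R ≤ g.length ∧ ∀ i, i < R → C ≤ rowLen g i

-- "the bomb at p clears cell q", with A's guards and with strict-inequality guards
abbrev TgtA (r c : Int) (p q : Nat × Nat) : Prop :=
  q = p
  ∨ ((p.1 : Int) + 1 ≤ r - 1 ∧ q = (p.1 + 1, p.2))
  ∨ ((p.1 : Int) - 1 ≥ 0 ∧ q = (p.1 - 1, p.2))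
  ∨ ((p.2 : Int) + 1 ≤ c - 1 ∧ q = (p.1, p.2 + 1))
  ∨ ((p.2 : Int) - 1 ≥ 0 ∧ q = (p.1, p.2 - 1))

abbrev TgtB (r c : Int) (p q : Nat × Nat) : Prop :=
  q = p
  ∨ ((p.1 : Int) + 1 < r ∧ q = (p.1 + 1, p.2))
  ∨ ((p.1 : Int) - 1 ≥ 0 ∧ q = (p.1 - 1, p.2))
  ∨ ((p.2 : Int) + 1 < c ∧ q = (p.1, p.2 + 1))
  ∨ ((p.2 : Int) - 1 ≥ 0 ∧ q = (p.1, p.2 - 1))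

-- the list of cells A's blast writes for the bomb p (same guards, same order)
def tcells (r c : Int) (p : Nat × Nat) : List (Nat × Nat) :=
  (p.1, p.2) ::
    ((if (p.1 : Int) + 1 ≤ r - 1 then [(p.1 + 1, p.2)] else [])
     ++ (if (p.1 : Int) - 1 ≥ 0 then [(p.1 - 1, p.2)] else [])
     ++ (if (p.2 : Int) + 1 ≤ c - 1 then [(p.1, p.2 + 1)] else [])
     ++ (if (p.2 : Int) - 1 ≥ 0 then [(p.1, p.2 - 1)] else []))

-- bombs of row i / of the whole region, read from g
def rowBombs (g : List (List String)) (i C : Nat) : List (Nat × Nat) :=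
  (List.range C).filterMap (fun j => if pvCell g i j = some "O" then some (i, j) else none)

def bombs (g : List (List String)) (R C : Nat) : List (Nat × Nat) :=
  (List.range R).flatMap (fun i => rowBombs g i C)

-- the generic write pass
def writeRow (V : Nat → Nat → String) (i C : Nat) (g : List (List String)) : List (List String) :=
  (List.range C).foldl (fun g j => pvSet2 g i j (V i j)) g

def writePass (V : Nat → Nat → String) (R C : Nat) (g : List (List String)) : List (List String) :=
  (List.range R).foldl (fun g i => writeRow V i C g) g

theorem sameShape_trans {g h k : List (List String)} (h1 : SameShape g h) (h2 : SameShape h k) : SameShape g k :=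
  ⟨h1.1.trans h2.1, fun i => (h1.2 i).trans (h2.2 i)⟩

theorem sameShape_symm {g h : List (List String)} (h1 : SameShape g h) : SameShape h g :=
  ⟨h1.1.symm, fun i => (h1.2 i).symm⟩

theorem goodAt_of_sameShape {g g' : List (List String)} {R C : Nat}
    (hs : SameShape g' g) (hG : GoodAt g R C) : GoodAt g' R C :=
  ⟨hs.1 ▸ hG.1, fun i hi => (hs.2 i) ▸ hG.2 i hi⟩

theorem sameShape_set2 (g : List (List String)) (i j : Nat) (v : String) :
    SameShape (pvSet2 g i j v) g := by
  refine ⟨by simp [pvSet2], fun k => ?_⟩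
  simp only [rowLen, pvSet2, List.getElem?_modify]
  cases g[k]? <;> simp
  split <;> simp

theorem cell_set_ne {i j i' j' : Nat} (g : List (List String)) (v : String)
    (h : ¬(i' = i ∧ j' = j)) : pvCell (pvSet2 g i j v) i' j' = pvCell g i' j' := by
  simp only [pvCell, pvSet2, List.getElem?_modify]
  cases g[i']? <;> simp
  split
  · next heq => simp [List.getElem?_set]; intro hj; omega
  · rfl

theorem cell_set_self {g : List (List String)} {i j : Nat} (v : String)
    (hi : i < g.length) (hj : j < rowLen g i) :
    pvCell (pvSet2 g i j v) i j = some v := by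
  have hrow : g[i]? = some (g[i]'hi) := List.getElem?_eq_getElem hi
  simp only [pvCell, pvSet2, List.getElem?_modify, hrow]
  have : j < (g[i]'hi).length := by simpa [rowLen, hrow] using hj
  simp [this]

theorem sameShape_writeRow (V : Nat → Nat → String) (i C : Nat) (g : List (List String)) :
    SameShape (writeRow V i C g) g := by
  induction C generalizing g with
  | zero => exact ⟨rfl, fun _ => rfl⟩
  | succ m ih =>
    have : writeRow V i (m+1) g = pvSet2 (writeRow V i m g) i m (V i m) := by
      simp [writeRow, List.range_succ]
    rw [this]
    exact sameShape_trans (sameShape_set2 ..) (ih g)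

theorem sameShape_writePass (V : Nat → Nat → String) (R C : Nat) (g : List (List String)) :
    SameShape (writePass V R C g) g := by
  induction R generalizing g with
  | zero => exact ⟨rfl, fun _ => rfl⟩
  | succ m ih =>
    have : writePass V (m+1) C g = writeRow V m C (writePass V m C g) := by
      simp [writePass, List.range_succ]
    rw [this]
    exact sameShape_trans (sameShape_writeRow ..) (ih g)

theorem cell_writeRow_ne (V : Nat → Nat → String) {i C i' j' : Nat} (g : List (List String))
    (h : i' ≠ i ∨ C ≤ j') : pvCell (writeRow V i C g) i' j' = pvCell g i' j' := by
  induction C generalizing g with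
  | zero => rfl
  | succ m ih =>
    have hw : writeRow V i (m+1) g = pvSet2 (writeRow V i m g) i m (V i m) := by
      simp [writeRow, List.range_succ]
    rw [hw, cell_set_ne _ _ (by omega), ih g (by omega)]

theorem cell_writeRow_self (V : Nat → Nat → String) {i C j' : Nat} (g : List (List String))
    (hj : j' < C) (hi : i < g.length) (hlen : j' < rowLen g i) :
    pvCell (writeRow V i C g) i j' = some (V i j') := by
  induction C generalizing g with
  | zero => omega
  | succ m ih =>
    have hw : writeRow V i (m+1) g = pvSet2 (writeRow V i m g) i m (V i m) := by
      simp [writeRow, List.range_succ]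
    have hsh := sameShape_writeRow V i m g
    by_cases hjm : j' = m
    · subst hjm
      have h1 : i < (writeRow V i j' g).length := by rw [hsh.1]; exact hi
      have h2 : j' < rowLen (writeRow V i j' g) i := by rw [hsh.2 i]; omega
      rw [hw]
      exact cell_set_self _ h1 h2
    · rw [hw, cell_set_ne _ _ (by omega), ih g (by omega) hi hlen]

theorem cell_writePass_ge (V : Nat → Nat → String) {R C i j : Nat} (g : List (List String))
    (h : R ≤ i) : pvCell (writePass V R C g) i j = pvCell g i j := by
  induction R generalizing g with
  | zero => simp [writePass]
  | succ m ih =>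
    have hw : writePass V (m+1) C g = writeRow V m C (writePass V m C g) := by
      simp [writePass, List.range_succ]
    rw [hw, cell_writeRow_ne _ _ (Or.inl (by omega)), ih g (by omega)]

theorem cell_writePass (V : Nat → Nat → String) {R C i j : Nat} (g : List (List String))
    (hG : GoodAt g R C) :
    pvCell (writePass V R C g) i j =
      if i < R ∧ j < C then some (V i j) else pvCell g i j := by
  induction R generalizing g with
  | zero => simp [writePass]
  | succ m ih =>
    have hw : writePass V (m+1) C g = writeRow V m C (writePass V m C g) := by
      simp [writePass, List.range_succ]
    have hGm : GoodAt g m C := ⟨by have := hG.1; omega, fun k hk => hG.2 k (by omega)⟩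
    have hsh := sameShape_writePass V m C g
    by_cases him : i = m
    · subst him
      by_cases hj : j < C
      · have h1 : i < (writePass V i C g).length := by
          have := hG.1; rw [hsh.1]; omega
        have h2 : j < rowLen (writePass V i C g) i := by
          rw [hsh.2 i]; have := hG.2 i (by omega); omega
        rw [hw, cell_writeRow_self _ _ hj h1 h2]
        simp [hj]
      · rw [hw, cell_writeRow_ne _ _ (Or.inr (by omega)), ih g hGm]
        simp [hj]
    · rw [hw, cell_writeRow_ne _ _ (Or.inl him), ih g hGm]
      by_cases hi : i < m
      · have h1 : i < m + 1 := by omega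
        simp [hi, h1]
      · have h1 : ¬ i < m + 1 := by omega
        simp [hi, h1]

-- ---- A's blast as a list of '.'-writes ----

theorem blast_eq_foldl (r c : Int) (g : List (List String)) (p : Nat × Nat) :
    pvBlast r c g p = (tcells r c p).foldl (fun h q => pvSet2 h q.1 q.2 ".") g := by
  simp only [pvBlast, tcells]
  split_ifs <;> simp

theorem mem_tcells {r c : Int} {p q : Nat × Nat} : q ∈ tcells r c p ↔ TgtA r c p q := by
  simp only [tcells, TgtA]
  split_ifs <;>
    simp only [List.mem_cons, List.mem_append, List.not_mem_nil,
      or_false, false_or] <;>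
    tauto

theorem tgtA_iff_tgtB {r c : Int} {p q : Nat × Nat} : TgtA r c p q ↔ TgtB r c p q := by
  have h1 : ((p.1 : Int) + 1 ≤ r - 1) ↔ ((p.1 : Int) + 1 < r) := by omega
  have h2 : ((p.2 : Int) + 1 ≤ c - 1) ↔ ((p.2 : Int) + 1 < c) := by omega
  unfold TgtA TgtB
  rw [h1, h2]

theorem tgtB_bounds {r c : Int} {p q : Nat × Nat} (h : TgtB r c p q)
    (h1 : p.1 < r.toNat) (h2 : p.2 < c.toNat) : q.1 < r.toNat ∧ q.2 < c.toNat := by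
  rcases h with h | ⟨hg, h⟩ | ⟨hg, h⟩ | ⟨hg, h⟩ | ⟨hg, h⟩ <;> subst h <;> simp <;> omega

theorem cell_writeCells {R C : Nat} (L : List (Nat × Nat)) (g : List (List String))
    (hG : GoodAt g R C) (hb : ∀ p ∈ L, p.1 < R ∧ p.2 < C) (i j : Nat) :
    pvCell (L.foldl (fun h q => pvSet2 h q.1 q.2 ".") g) i j =
      if (i, j) ∈ L then some "." else pvCell g i j := by
  induction L generalizing g with
  | nil => simp
  | cons p L' ih =>
    have hG' : GoodAt (pvSet2 g p.1 p.2 ".") R C :=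
      goodAt_of_sameShape (sameShape_set2 ..) hG
    rw [List.foldl_cons, ih _ hG' (fun q hq => hb q (List.mem_cons_of_mem _ hq))]
    by_cases hL' : (i, j) ∈ L'
    · simp [hL']
    · by_cases hpq : (i, j) = p
      · have hbp := hb p (List.mem_cons_self ..)
        obtain ⟨hi', hj'⟩ : i = p.1 ∧ j = p.2 := by
          simpa [Prod.ext_iff] using hpq
        have : pvCell (pvSet2 g p.1 p.2 ".") i j = some "." := by
          rw [hi', hj']
          have hl1 := hG.1
          have hl2 := hG.2 p.1 hbp.1
          exact cell_set_self _ (by omega) (by omega)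
        simp [hpq, this]
      · rw [cell_set_ne _ _ (by rw [Prod.ext_iff] at hpq; tauto)]
        simp [hL', hpq]

theorem sameShape_writeCells (L : List (Nat × Nat)) (g : List (List String)) :
    SameShape (L.foldl (fun h q => pvSet2 h q.1 q.2 ".") g) g := by
  induction L generalizing g with
  | nil => exact ⟨rfl, fun _ => rfl⟩
  | cons p L' ih => exact sameShape_trans (ih _) (sameShape_set2 ..)

theorem sameShape_blast (r c : Int) (g : List (List String)) (p : Nat × Nat) :
    SameShape (pvBlast r c g p) g := by
  rw [blast_eq_foldl]; exact sameShape_writeCells ..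

theorem tcells_bounds {r c : Int} {p q : Nat × Nat} (hq : q ∈ tcells r c p)
    (h1 : p.1 < r.toNat) (h2 : p.2 < c.toNat) : q.1 < r.toNat ∧ q.2 < c.toNat :=
  tgtB_bounds (tgtA_iff_tgtB.1 (mem_tcells.1 hq)) h1 h2

theorem cell_blast (r c : Int) (g : List (List String)) (p : Nat × Nat) (i j : Nat)
    (hG : GoodAt g r.toNat c.toNat) (h1 : p.1 < r.toNat) (h2 : p.2 < c.toNat) :
    pvCell (pvBlast r c g p) i j =
      if TgtB r c p (i, j) then some "." else pvCell g i j := by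
  rw [blast_eq_foldl,
    cell_writeCells _ _ hG (fun q hq => tcells_bounds hq h1 h2)]
  by_cases h : (i, j) ∈ tcells r c p
  · simp [h, tgtA_iff_tgtB.1 (mem_tcells.1 h)]
  · have : ¬ TgtB r c p (i, j) := fun hT => h (mem_tcells.2 (tgtA_iff_tgtB.2 hT))
    simp [h, this]

theorem cell_blastFold (r c : Int) (L : List (Nat × Nat)) (g : List (List String)) (i j : Nat)
    (hG : GoodAt g r.toNat c.toNat) (hb : ∀ p ∈ L, p.1 < r.toNat ∧ p.2 < c.toNat) :
    pvCell (L.foldl (pvBlast r c) g) i j =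
      if ∃ p ∈ L, TgtB r c p (i, j) then some "." else pvCell g i j := by
  induction L generalizing g with
  | nil => simp
  | cons p L' ih =>
    have hbp := hb p (List.mem_cons_self ..)
    have hG' : GoodAt (pvBlast r c g p) r.toNat c.toNat :=
      goodAt_of_sameShape (sameShape_blast ..) hG
    rw [List.foldl_cons, ih _ hG' (fun q hq => hb q (List.mem_cons_of_mem _ hq)),
      cell_blast r c g p i j hG hbp.1 hbp.2]
    by_cases hL' : ∃ p ∈ L', TgtB r c p (i, j)
    · simp [hL']
    · by_cases hp : TgtB r c p (i, j) <;> simp [hL', hp]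

theorem sameShape_blastFold (r c : Int) (L : List (Nat × Nat)) (g : List (List String)) :
    SameShape (L.foldl (pvBlast r c) g) g := by
  induction L generalizing g with
  | nil => exact ⟨rfl, fun _ => rfl⟩
  | cons p L' ih => exact sameShape_trans (ih _) (sameShape_blast ..)

-- ---- phase 1 of A ----

theorem phase1_row (i C : Nat) (Acc : List (Nat × Nat)) (g : List (List String)) :
    (List.range C).foldl
      (fun (st : List (Nat × Nat) × List (List String)) j =>
        ((if pvCell st.2 i j = some "O" then st.1 ++ [(i, j)] else st.1),
         pvSet2 st.2 i j "O"))
      (Acc, g)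
    = (Acc ++ rowBombs g i C, writeRow (fun _ _ => "O") i C g) := by
  induction C with
  | zero => simp [rowBombs, writeRow]
  | succ m ih =>
    rw [List.range_succ, List.foldl_append, ih]
    have hcell : pvCell (writeRow (fun _ _ => "O") i m g) i m = pvCell g i m :=
      cell_writeRow_ne _ _ (Or.inr le_rfl)
    have hrb : rowBombs g i (m + 1)
        = rowBombs g i m ++ (if pvCell g i m = some "O" then [(i, m)] else []) := by
      simp only [rowBombs, List.range_succ, List.filterMap_append]
      by_cases hcm : pvCell g i m = some "O" <;> simp [hcm]
    have hwr : writeRow (fun _ _ => "O") i (m + 1) g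
        = pvSet2 (writeRow (fun _ _ => "O") i m g) i m "O" := by
      simp [writeRow, List.range_succ]
    simp only [List.foldl_cons, List.foldl_nil, hcell, hrb, hwr]
    by_cases hc : pvCell g i m = some "O" <;> simp [hc]

theorem phase1 (_r c : Int) (grid : List (List String)) (R : Nat) :
    (List.range R).foldl
      (fun (st : List (Nat × Nat) × List (List String)) i =>
        (List.range c.toNat).foldl
          (fun st j =>
            ((if pvCell st.2 i j = some "O" then st.1 ++ [(i, j)] else st.1),
             pvSet2 st.2 i j "O")) st)
      ([], grid)
    = (bombs grid R c.toNat, writePass (fun _ _ => "O") R c.toNat grid) := by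
  induction R with
  | zero => simp [bombs, writePass]
  | succ m ih =>
    rw [List.range_succ, List.foldl_append, ih]
    simp only [List.foldl_cons, List.foldl_nil]
    rw [phase1_row]
    have hrb : rowBombs (writePass (fun _ _ => "O") m c.toNat grid) m c.toNat
        = rowBombs grid m c.toNat := by
      unfold rowBombs
      apply List.filterMap_congr
      intro j hj
      rw [cell_writePass_ge _ _ le_rfl]
    have hb : bombs grid (m + 1) c.toNat = bombs grid m c.toNat ++ rowBombs grid m c.toNat := by
      simp [bombs, List.range_succ]
    have hwp : writePass (fun _ _ => "O") (m + 1) c.toNat grid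
        = writeRow (fun _ _ => "O") m c.toNat (writePass (fun _ _ => "O") m c.toNat grid) := by
      simp [writePass, List.range_succ]
    rw [hrb, hb, hwp]

theorem mem_bombs {g : List (List String)} {R C : Nat} {p : Nat × Nat} :
    p ∈ bombs g R C ↔ p.1 < R ∧ p.2 < C ∧ pvCell g p.1 p.2 = some "O" := by
  simp only [bombs, rowBombs, List.mem_flatMap, List.mem_filterMap, List.mem_range]
  constructor
  · rintro ⟨i, hi, j, hj, hcell⟩
    split at hcell
    · cases hcell; simp_all
    · cases hcell
  · rintro ⟨h1, h2, h3⟩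
    exact ⟨p.1, h1, p.2, h2, by simp [h3]⟩

-- ---- B's stencil ----

theorem cell_orig {r c : Int} {grid : List (List String)} {i j : Nat}
    (hG : GoodAt grid r.toNat c.toNat) (hi : i < r.toNat) (hj : j < c.toNat) :
    pvCell (pvOrig r c grid) i j = pvCell grid i j := by
  have hig : i < grid.length := by have := hG.1; omega
  have hrow : grid[i]? = some (grid[i]'hig) := List.getElem?_eq_getElem hig
  have hjl : j < (grid[i]'hig).length := by
    have := hG.2 i hi
    simp [rowLen, hrow] at this
    omega
  simp [pvCell, pvOrig, List.getElem?_map, List.getElem?_range hi, List.getElem?_range hj,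
    hrow, List.getElem?_eq_getElem hjl]

-- pvBomb at in-bounds Nat coordinates, read through the snapshot
theorem pvBomb_nat {r c : Int} {grid : List (List String)} (hG : GoodAt grid r.toNat c.toNat)
    (a b : Nat) :
    pvBomb r c (pvOrig r c grid) (a : Int) (b : Int) = true
      ↔ a < r.toNat ∧ b < c.toNat ∧ pvCell grid a b = some "O" := by
  simp only [pvBomb, Bool.and_eq_true, decide_eq_true_eq, beq_iff_eq, Int.toNat_natCast]
  constructor
  · rintro ⟨⟨⟨⟨-, h2⟩, -⟩, h4⟩, h5⟩
    have ha : a < r.toNat := by omega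
    have hb : b < c.toNat := by omega
    exact ⟨ha, hb, (cell_orig hG ha hb).symm.trans h5⟩
  · rintro ⟨ha, hb, hcell⟩
    exact ⟨⟨⟨⟨by positivity, by omega⟩, by positivity⟩, by omega⟩,
      (cell_orig hG ha hb).trans hcell⟩

-- the stencil at (i,j) holds iff some bomb of the region targets (i,j)
theorem stencil_iff {r c : Int} {grid : List (List String)} (hG : GoodAt grid r.toNat c.toNat)
    {i j : Nat} (hi : i < r.toNat) (hj : j < c.toNat) :
    (pvBomb r c (pvOrig r c grid) i j || pvBomb r c (pvOrig r c grid) ((i : Int) + 1) j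
      || pvBomb r c (pvOrig r c grid) ((i : Int) - 1) j
      || pvBomb r c (pvOrig r c grid) i ((j : Int) + 1)
      || pvBomb r c (pvOrig r c grid) i ((j : Int) - 1)) = true
      ↔ ∃ p ∈ bombs grid r.toNat c.toNat, TgtB r c p (i, j) := by
  have e1 : ((i : Int) + 1) = ((i + 1 : Nat) : Int) := by push_cast; ring
  have e2 : ((j : Int) + 1) = ((j + 1 : Nat) : Int) := by push_cast; ring
  rw [e1, e2]
  simp only [Bool.or_eq_true]
  constructor
  · rintro ((((h | h) | h) | h) | h)
    · obtain ⟨ha, hb, hcell⟩ := (pvBomb_nat hG i j).1 h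
      exact ⟨(i, j), mem_bombs.2 ⟨ha, hb, hcell⟩, Or.inl rfl⟩
    · obtain ⟨ha, hb, hcell⟩ := (pvBomb_nat hG (i + 1) j).1 h
      exact ⟨(i + 1, j), mem_bombs.2 ⟨ha, hb, hcell⟩,
        Or.inr (Or.inr (Or.inl ⟨by push_cast; omega, rfl⟩))⟩
    · -- bomb(i-1, j): the 0 ≤ i-1 guard gives i ≥ 1
      simp only [pvBomb, Bool.and_eq_true, decide_eq_true_eq, beq_iff_eq,
        Int.toNat_natCast] at h
      obtain ⟨⟨⟨⟨h0, h1r⟩, -⟩, -⟩, hc5⟩ := h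
      have hi1 : 1 ≤ i := by omega
      have ha : i - 1 < r.toNat := by omega
      have e3 : ((i : Int) - 1).toNat = i - 1 := by omega
      rw [e3, cell_orig hG ha hj] at hc5
      refine ⟨(i - 1, j), mem_bombs.2 ⟨ha, hj, hc5⟩,
        Or.inr (Or.inl ⟨by push_cast [hi1]; omega, by rw [Nat.sub_add_cancel hi1]⟩)⟩
    · obtain ⟨ha, hb, hcell⟩ := (pvBomb_nat hG i (j + 1)).1 h
      exact ⟨(i, j + 1), mem_bombs.2 ⟨ha, hb, hcell⟩,
        Or.inr (Or.inr (Or.inr (Or.inr ⟨by push_cast; omega, rfl⟩)))⟩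
    · -- bomb(i, j-1): the 0 ≤ j-1 guard gives j ≥ 1
      simp only [pvBomb, Bool.and_eq_true, decide_eq_true_eq, beq_iff_eq,
        Int.toNat_natCast] at h
      obtain ⟨⟨⟨⟨-, -⟩, h0⟩, h1c⟩, hc5⟩ := h
      have hj1 : 1 ≤ j := by omega
      have hb : j - 1 < c.toNat := by omega
      have e3 : ((j : Int) - 1).toNat = j - 1 := by omega
      rw [e3, cell_orig hG hi hb] at hc5
      refine ⟨(i, j - 1), mem_bombs.2 ⟨hi, hb, hc5⟩,
        Or.inr (Or.inr (Or.inr (Or.inl ⟨by push_cast [hj1]; omega,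
          by rw [Nat.sub_add_cancel hj1]⟩)))⟩
  · rintro ⟨p, hp, hT⟩
    obtain ⟨ha, hb, hcell⟩ := mem_bombs.1 hp
    rcases hT with h | ⟨hg, h⟩ | ⟨hg, h⟩ | ⟨hg, h⟩ | ⟨hg, h⟩
    · obtain rfl : p = (i, j) := h.symm
      exact Or.inl (Or.inl (Or.inl (Or.inl ((pvBomb_nat hG i j).2
        ⟨by simpa using ha, by simpa using hb, by simpa using hcell⟩))))
    · -- (i,j) = (p.1 + 1, p.2): the bomb p is at (i - 1, j)
      obtain ⟨h1, h2⟩ : i = p.1 + 1 ∧ j = p.2 := by simpa [Prod.ext_iff] using h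
      have e3 : ((i : Int) - 1) = ((i - 1 : Nat) : Int) := by push_cast [h1]; omega
      refine Or.inl (Or.inl (Or.inr ?_))
      rw [e3]
      refine (pvBomb_nat hG (i - 1) j).2 ⟨by omega, hj, ?_⟩
      have hpe : i - 1 = p.1 := by omega
      rw [hpe, h2]
      exact hcell
    · -- (i,j) = (p.1 - 1, p.2): the bomb p is at (i + 1, j)
      have hp1 : 1 ≤ p.1 := by omega
      obtain ⟨h1, h2⟩ : i = p.1 - 1 ∧ j = p.2 := by simpa [Prod.ext_iff] using h
      refine Or.inl (Or.inl (Or.inl (Or.inr ?_)))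
      refine (pvBomb_nat hG (i + 1) j).2 ⟨by omega, hj, ?_⟩
      have hpe : i + 1 = p.1 := by omega
      rw [hpe, h2]
      exact hcell
    · -- (i,j) = (p.1, p.2 + 1): the bomb p is at (i, j - 1)
      obtain ⟨h1, h2⟩ : i = p.1 ∧ j = p.2 + 1 := by simpa [Prod.ext_iff] using h
      have e3 : ((j : Int) - 1) = ((j - 1 : Nat) : Int) := by push_cast [h2]; omega
      refine Or.inr ?_
      rw [e3]
      refine (pvBomb_nat hG i (j - 1)).2 ⟨hi, by omega, ?_⟩
      have hpe : j - 1 = p.2 := by omega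
      rw [hpe, h1]
      exact hcell
    · -- (i,j) = (p.1, p.2 - 1): the bomb p is at (i, j + 1)
      have hp2 : 1 ≤ p.2 := by omega
      obtain ⟨h1, h2⟩ : i = p.1 ∧ j = p.2 - 1 := by simpa [Prod.ext_iff] using h
      refine Or.inl (Or.inr ?_)
      refine (pvBomb_nat hG i (j + 1)).2 ⟨hi, by omega, ?_⟩
      have hpe : j + 1 = p.2 := by omega
      rw [hpe, h1]
      exact hcell

-- ---- putting the grids together ----

theorem grid_ext {g g' : List (List String)} (hs : SameShape g g')
    (hc : ∀ i j, pvCell g i j = pvCell g' i j) : g = g' := by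
  apply List.ext_getElem?
  intro i
  cases h1 : g[i]? with
  | none =>
    have hlen : g.length ≤ i := List.getElem?_eq_none_iff.1 h1
    exact (List.getElem?_eq_none_iff.2 (hs.1 ▸ hlen)).symm
  | some row =>
    obtain ⟨hi, -⟩ := List.getElem?_eq_some_iff.1 h1
    have hi' : i < g'.length := hs.1 ▸ hi
    have h2 : g'[i]? = some (g'[i]'hi') := List.getElem?_eq_getElem hi'
    rw [h2]
    congr 1
    have hrl : row.length = (g'[i]'hi').length := by
      have := hs.2 i
      simp [rowLen, h1, h2] at this
      exact this
    apply List.ext_getElem?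
    intro j
    have := hc i j
    simpa [pvCell, h1, h2] using this

-- ===== VERDICT (by name: the statement is the Claim_ definition above) =====
theorem detonation_spec : Claim_equal_detonation := by
  intro r c grid _ hPre
  unfold Spec_detonation
  rcases hPre with hc0 | ⟨hR, hC⟩
  · -- c.toNat = 0: both inner loops are empty, both programs return grid
    unfold detonation detonation_alt
    rw [hc0]
    simp
  · -- main case
    have hG : GoodAt grid r.toNat c.toNat := by
      refine ⟨hR, fun i hi => ?_⟩
      have hig : i < grid.length := by omega
      have hrow : grid[i]? = some (grid[i]'hig) := List.getElem?_eq_getElem hig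
      have hmem : grid[i]'hig ∈ grid.take r.toNat := by
        have : (grid.take r.toNat)[i]? = some (grid[i]'hig) := by
          rw [List.getElem?_take]
          simp [hi, hrow]
        exact List.mem_of_getElem? this
      have := hC _ hmem
      simp [rowLen, hrow]
      omega
    set V : Nat → Nat → String := fun _ _ => "O" with hV
    -- A's result
    have hA : detonation r c grid
        = (bombs grid r.toNat c.toNat).foldl (pvBlast r c) (writePass V r.toNat c.toNat grid) := by
      unfold detonation
      rw [phase1 r c grid r.toNat]
    -- B's result is a write pass with the stencil value function
    set W : Nat → Nat → String :=
      fun i j =>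
        if pvBomb r c (pvOrig r c grid) i j || pvBomb r c (pvOrig r c grid) ((i : Int) + 1) j
            || pvBomb r c (pvOrig r c grid) ((i : Int) - 1) j
            || pvBomb r c (pvOrig r c grid) i ((j : Int) + 1)
            || pvBomb r c (pvOrig r c grid) i ((j : Int) - 1)
        then "." else "O" with hW
    have hB : detonation_alt r c grid = writePass W r.toNat c.toNat grid := rfl
    rw [hA, hB]
    -- cellwise equality
    apply grid_ext
    · exact sameShape_trans (sameShape_blastFold ..)
        (sameShape_trans (sameShape_writePass ..)
          (sameShape_symm (sameShape_writePass ..)))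
    · intro i j
      have hbnd : ∀ p ∈ bombs grid r.toNat c.toNat, p.1 < r.toNat ∧ p.2 < c.toNat :=
        fun p hp => ⟨(mem_bombs.1 hp).1, (mem_bombs.1 hp).2.1⟩
      have hGwp : GoodAt (writePass V r.toNat c.toNat grid) r.toNat c.toNat :=
        goodAt_of_sameShape (sameShape_writePass ..) hG
      rw [cell_blastFold r c _ _ i j hGwp hbnd,
        cell_writePass V grid hG, cell_writePass W grid hG]
      by_cases hex : ∃ p ∈ bombs grid r.toNat c.toNat, TgtB r c p (i, j)
      · obtain ⟨p, hp, hT⟩ := hex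
        have hb := tgtB_bounds hT (hbnd p hp).1 (hbnd p hp).2
        have hij : i < r.toNat ∧ j < c.toNat := hb
        have hWij : W i j = "." := by
          rw [hW]
          simp only []
          rw [if_pos ((stencil_iff hG hij.1 hij.2).2 ⟨p, hp, hT⟩)]
        rw [if_pos (⟨p, hp, hT⟩ : ∃ p ∈ bombs grid r.toNat c.toNat, TgtB r c p (i, j)),
          if_pos hij, hWij]
      · rw [if_neg hex]
        by_cases hij : i < r.toNat ∧ j < c.toNat
        · have hWij : W i j = "O" := by
            rw [hW]
            simp only []
            rw [if_neg (fun hcon => hex ((stencil_iff hG hij.1 hij.2).1 hcon))]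
          rw [if_pos hij, if_pos hij, hWij]
        · rw [if_neg hij, if_neg hij]
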